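-- pv_equiv track=rewrite | github.com/ExpHP/circuit | analysis.py | reduce_consistent_lists
-- ===== SOURCE A (Python) =====
-- from itertools import zip_longest
--
-- def are_lists_consistent(its):
-- 	return all(map(all_equal, zip_variadic(*its)))
--
-- def zip_variadic(*its):
-- 	sentinel = object()
-- 	def without_fill(xs):
-- 		return filter(lambda x: x is not sentinel, xs)
-- 	return (tuple(without_fill(xs)) for xs in zip_longest(*its, fillvalue=sentinel))
--
-- def all_equal(vals):
-- 	vals = list(vals)
-- 	if len(vals) == 0:
-- 		return True
--
-- 	return all(x == vals[0] for x in vals)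
--
-- def reduce_consistent_lists(its):
-- 	its = list(its)
-- 	if len(its) == 0:
-- 		return []
--
-- 	its = [list(x) for x in its]
-- 	if are_lists_consistent(its):
-- 		lengths = list(map(len, its))
-- 		return its[lengths.index(max(lengths))]
-- 	else:
-- 		raise ValueError('Lists are not consistent!')
-- ===== SOURCE B (Python) =====
-- def reduce_consistent_lists(its):
--     # Single row-wise pass: keep a running prototype (the first longest list so far),
--     # checking each list against it on their overlap.
--     proto = []
--     for cur in its:
--         cur = list(cur)
--         for a, b in zip(proto, cur):
--             if a != b:
--                 raise ValueError('Lists are not consistent!')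
--         if len(proto) < len(cur):
--             proto = cur
--     return proto
-- ===== Notes on version B (the rewrite author's own statement) =====
-- stated objective: simpler
-- what changed: replaces the column-wise transpose (zip_longest with a sentinel object, filtered tuples) plus a separate max-length/index lookup with one row-wise pass that keeps a running prototype, checking each list against it on the overlap and keeping the first longest list; avoiding the per-column tuple construction is the constant-factor speedup
import Mathlib
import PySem

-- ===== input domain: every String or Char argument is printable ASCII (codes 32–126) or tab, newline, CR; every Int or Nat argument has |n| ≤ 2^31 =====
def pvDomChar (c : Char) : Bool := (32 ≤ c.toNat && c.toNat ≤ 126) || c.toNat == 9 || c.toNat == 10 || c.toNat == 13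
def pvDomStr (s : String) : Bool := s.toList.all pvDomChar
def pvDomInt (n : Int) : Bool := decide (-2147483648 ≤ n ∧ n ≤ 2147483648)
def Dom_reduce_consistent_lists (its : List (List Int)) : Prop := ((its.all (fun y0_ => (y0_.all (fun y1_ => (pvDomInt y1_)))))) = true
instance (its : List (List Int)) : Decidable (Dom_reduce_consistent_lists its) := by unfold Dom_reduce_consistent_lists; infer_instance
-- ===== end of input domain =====

-- B replaces A's column-wise transpose + max-length/index lookup by one row-wise pass
-- keeping a running prototype; objective: simpler. A raises ValueError on inconsistent
-- lists (excluded by Pre_); B raises there too.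


-- ===== PORT A =====
-- all_equal(vals): empty -> True, else all(x == vals[0] for x in vals)
def pvAllEqual (vals : List Int) : Bool :=
  match vals with
  | [] => true
  | h :: _ => vals.all (fun x => x == h)

-- number of tuples produced by zip_longest = max of the lengths (0 for no lists)
def pvMaxLen (its : List (List Int)) : Nat :=
  its.foldr (fun x m => max x.length m) 0

-- zip_variadic's k-th tuple with the sentinel fill filtered out:
-- the k-th element of every list long enough, in list order
def pvColumn (its : List (List Int)) (k : Nat) : List Int :=
  its.filterMap (fun x => x[k]?)

-- are_lists_consistent(its) = all(map(all_equal, zip_variadic(*its)))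
def pvAreConsistent (its : List (List Int)) : Bool :=
  (List.range (pvMaxLen its)).all (fun k => pvAllEqual (pvColumn its k))

-- list(map(len, its)) (Python lengths are ints)
def pvLengths (its : List (List Int)) : List Int := its.map (fun x => (x.length : Int))

-- its[lengths.index(max(lengths))]: max() on the nonempty lengths list, then .index, then indexing
def pvPickLongest (its : List (List Int)) : List Int :=
  (PySem.List.pyGet? its
    (((PySem.List.index? (pvLengths its)
        ((PySem.List.max? (pvLengths its) (fun y => y)).getD 0)).getD 0 : Nat) : Int)).getD []

def reduce_consistent_lists (its : List (List Int)) : List Int :=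
  if its.length = 0 then []
  else if pvAreConsistent its then pvPickLongest its
  else []  -- Python: raise ValueError('Lists are not consistent!'); excluded by Pre_

-- ===== PORT B =====
-- one step of B's loop: compare against the prototype on the overlap, keep the longer
def pvStepB (proto cur : List Int) : List Int :=
  if (proto.zip cur).any (fun p => p.1 != p.2) then proto
    -- Python: raise ValueError('Lists are not consistent!'); excluded by Pre_
  else if proto.length < cur.length then cur else proto

def reduce_consistent_lists_alt (its : List (List Int)) : List Int :=
  its.foldl pvStepB []

-- ===== PRECONDITION & SPEC =====
-- Pre_: the lists agree pairwise on their overlapping prefixes — exactly the inputs on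
-- which A returns (otherwise A raises ValueError, and so does B).
def Pre_reduce_consistent_lists (its : List (List Int)) : Prop :=
  ∀ a ∈ its, ∀ b ∈ its, ∀ p ∈ a.zip b, p.1 = p.2
instance (its : List (List Int)) : Decidable (Pre_reduce_consistent_lists its) := by
  unfold Pre_reduce_consistent_lists; infer_instance

def pvWitness_reduce_consistent_lists : List (List Int) := [[1, 2], [1, 2, 3], [1]]

def Spec_reduce_consistent_lists (its : List (List Int)) (out : List Int) : Prop := out = reduce_consistent_lists_alt its
instance (its : List (List Int)) (out : List Int) : Decidable (Spec_reduce_consistent_lists its out) := by unfold Spec_reduce_consistent_lists; infer_instance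

-- ===== CLAIM (what is proved, stated in full; the proofs are below) =====
def Claim_equal_reduce_consistent_lists : Prop := ∀ (its : List (List Int)), Dom_reduce_consistent_lists its → Pre_reduce_consistent_lists its → Spec_reduce_consistent_lists its (reduce_consistent_lists its)

-- ===== LEMMAS AND PROOFS =====

-- the pure "first longest" update both sides reduce to
def pvUpd (b x : List Int) : List Int := if b.length < x.length then x else b

-- if nothing in t is strictly longer than b, the fold keeps b
theorem pv_foldl_upd_keep (t : List (List Int)) (b : List Int)
    (h : ∀ x ∈ t, x.length ≤ b.length) : t.foldl pvUpd b = b := by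
  induction t with
  | nil => rfl
  | cons y t ih =>
      have hy : y.length ≤ b.length := h y (by simp)
      simp only [List.foldl_cons, pvUpd, if_neg (by omega : ¬ b.length < y.length)]
      exact ih (fun x hx => h x (by simp [hx]))

-- the fold reaches the first list of maximal length, provided the start is shorter
theorem pv_foldl_upd_reach (ys : List (List Int)) (b : List Int) (k : Nat)
    (hk : k < ys.length)
    (hmax : ∀ j (hj : j < ys.length), ys[j].length ≤ ys[k].length)
    (hfirst : ∀ j (hj : j < k), ys[j].length < ys[k].length)
    (hb : b.length < ys[k].length) : ys.foldl pvUpd b = ys[k] := by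
  induction ys generalizing b k with
  | nil => simp at hk
  | cons y t ih =>
      cases k with
      | zero =>
          simp only [List.getElem_cons_zero] at hmax hb ⊢
          simp only [List.foldl_cons, pvUpd, if_pos hb]
          exact pv_foldl_upd_keep t y (fun x hx => by
            obtain ⟨j, hj, rfl⟩ := List.getElem_of_mem hx
            exact hmax (j + 1) (by simpa using Nat.succ_lt_succ hj))
      | succ k =>
          have hk' : k < t.length := by simpa using hk
          have hy : y.length < t[k].length := by
            have := hfirst 0 (Nat.succ_pos k)
            simpa using this
          simp only [List.getElem_cons_succ] at hmax hfirst hb ⊢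
          simp only [List.foldl_cons]
          have hupd : (pvUpd b y).length < t[k].length := by
            unfold pvUpd; split_ifs <;> omega
          exact ih (pvUpd b y) k hk'
            (fun j hj => by simpa using hmax (j + 1) (by simpa using Nat.succ_lt_succ hj))
            (fun j hj => by simpa using hfirst (j + 1) (by simpa using Nat.succ_lt_succ hj))
            hupd

-- under consistency, B's step never sees a mismatch, so B's fold is the pvUpd fold
theorem pv_foldl_stepB_eq (its : List (List Int)) (proto : List Int)
    (hpre : Pre_reduce_consistent_lists its)
    (hp : ∀ x ∈ its, ∀ p ∈ proto.zip x, p.1 = p.2) :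
    its.foldl pvStepB proto = its.foldl pvUpd proto := by
  induction its generalizing proto with
  | nil => rfl
  | cons y t ih =>
      have hnomis : ((proto.zip y).any (fun p => p.1 != p.2)) = false := by
        simp only [List.any_eq_false, bne_iff_ne, ne_eq, not_not]
        exact fun p hpz => hp y (by simp) p hpz
      have hstep : pvStepB proto y = pvUpd proto y := by
        simp [pvStepB, pvUpd, hnomis]
      simp only [List.foldl_cons, hstep]
      refine ih (pvUpd proto y)
        (fun a ha b hb p hpz => hpre a (by simp [ha]) b (by simp [hb]) p hpz) ?_
      intro x hx p hpz
      unfold pvUpd at hpz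
      split_ifs at hpz
      · exact hpre y (by simp) x (by simp [hx]) p hpz
      · exact hp x (by simp [hx]) p hpz

-- under Pre_, A's consistency check succeeds
theorem pv_consistent_of_pre (its : List (List Int))
    (hpre : Pre_reduce_consistent_lists its) : pvAreConsistent its = true := by
  unfold pvAreConsistent
  simp only [List.all_eq_true]
  intro k _
  unfold pvAllEqual
  cases hcol : pvColumn its k with
  | nil => rfl
  | cons h tl =>
      have hmem : ∀ a ∈ pvColumn its k, ∀ b ∈ pvColumn its k, a = b := by
        intro a ha b hb
        unfold pvColumn at ha hb
        simp only [List.mem_filterMap] at ha hb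
        obtain ⟨x, hx, hxa⟩ := ha
        obtain ⟨y, hy, hyb⟩ := hb
        obtain ⟨hkx, hax⟩ := List.getElem?_eq_some_iff.mp hxa
        obtain ⟨hky, hby⟩ := List.getElem?_eq_some_iff.mp hyb
        have hax : a = x[k] := hax.symm
        have hby : b = y[k] := hby.symm
        have hzk : k < (x.zip y).length := by simp [List.length_zip]; omega
        have := hpre x hx y hy (x.zip y)[k] (List.getElem_mem hzk)
        rw [List.getElem_zip] at this
        simp only at this
        rw [hax, hby]; exact this
      simp only [List.all_eq_true, beq_iff_eq]
      intro x hx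
      exact hmem x (by rw [hcol]; exact hx) h (by rw [hcol]; simp)

-- ===== VERDICT (by name: the statement is the Claim_ definition above) =====
theorem reduce_consistent_lists_spec : Claim_equal_reduce_consistent_lists := by
  intro its _ hpre
  unfold Spec_reduce_consistent_lists
  unfold reduce_consistent_lists reduce_consistent_lists_alt
  cases hits : its with
  | nil => simp
  | cons y t =>
      rw [← hits]
      have hlen0 : ¬ its.length = 0 := by simp [hits]
      rw [if_neg hlen0, if_pos (pv_consistent_of_pre its hpre)]
      unfold pvPickLongest
      -- A side: extract the index of the first longest list
      have hlne : pvLengths its ≠ [] := by simp [pvLengths, hits]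
      obtain ⟨m, hm⟩ : ∃ m, PySem.List.max? (pvLengths its) (fun y => y) = some m := by
        cases hmx : PySem.List.max? (pvLengths its) (fun y => y) with
        | none => exact absurd ((PySem.List.max?_eq_none_iff (pvLengths its) (fun y => y)).mp hmx) hlne
        | some m => exact ⟨m, rfl⟩
      have hmmem : m ∈ pvLengths its := PySem.List.max?_mem hm
      have hmmax : ∀ z ∈ pvLengths its, z ≤ m := fun z hz => PySem.List.max?_isMax hm z hz
      obtain ⟨k, hk⟩ : ∃ k, PySem.List.index? (pvLengths its) m = some k := by
        cases hix : PySem.List.index? (pvLengths its) m with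
        | none =>
            rw [PySem.List.index?_eq_none_iff] at hix
            exact absurd hmmem hix
        | some k => exact ⟨k, rfl⟩
      obtain ⟨hklt, hkv, hkfirst⟩ := PySem.List.getElem_of_index?_eq_some hk
      have hklt' : k < its.length := by simpa [pvLengths] using hklt
      rw [hm]
      simp only [Option.getD_some]
      rw [hk]
      simp only [Option.getD_some]
      rw [PySem.List.pyGet?_natCast, List.getElem?_eq_getElem hklt', Option.getD_some]
      -- translate facts about lengths into facts about its
      have hval : (its[k].length : Int) = m := by
        have h1 : (pvLengths its)[k] = m := hkv
        simpa [pvLengths] using h1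
      have hmaxlen : ∀ j (hj : j < its.length), its[j].length ≤ its[k].length := by
        intro j hj
        have hz : (its[j].length : Int) ∈ pvLengths its := by
          simp only [pvLengths, List.mem_map]
          exact ⟨its[j], List.getElem_mem hj, rfl⟩
        have h2 := hmmax _ hz
        rw [← hval] at h2
        exact_mod_cast h2
      have hfirstlen : ∀ j (hj : j < k), its[j].length < its[k].length := by
        intro j hj
        have hjlt : j < its.length := lt_trans hj hklt'
        have hne' : (pvLengths its)[j]'(by simpa [pvLengths] using hjlt) ≠ m := hkfirst j hj
        have hjv : (pvLengths its)[j]'(by simpa [pvLengths] using hjlt) = (its[j].length : Int) := by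
          simp [pvLengths]
        rw [hjv, ← hval] at hne'
        have hle := hmaxlen j hjlt
        omega
      -- B side
      rw [pv_foldl_stepB_eq its [] hpre (by intro x _ p hp; simp at hp)]
      by_cases hzero : its[k].length = 0
      · have hall : ∀ x ∈ its, x.length ≤ ([] : List Int).length := by
          intro x hx
          obtain ⟨j, hj, rfl⟩ := List.getElem_of_mem hx
          simpa [hzero] using hmaxlen j hj
        rw [pv_foldl_upd_keep its [] hall]
        have h3 : its[k] = [] := List.eq_nil_of_length_eq_zero hzero
        rw [h3]
      · exact (pv_foldl_upd_reach its [] k hklt' hmaxlen hfirstlen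
          (by simpa using Nat.pos_of_ne_zero hzero)).symm
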